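-- pv_equiv track=rewrite | github.com/betagouv/depenses-eclairees | docia/file_processing/processor/post_processing_llm.py | check_consistency_iban
-- ===== SOURCE A (Python) =====
-- def check_consistency_iban(iban: str) -> bool:
--     """
--     Vérifie la validité d'un IBAN selon la norme ISO 13616.
--     Format accepté : Français 27 caractères, ou ''.
--     Retourne True si valide, False sinon.
--     """
--
--     if not iban:
--         return True
--
--     # Longueur minimale (2 lettres pays + 2 chiffres contrôle + BBAN)
--     elif len(iban) != 27:
--         return False
--
--     # 2. Déplacer les 4 premiers caractères à la fin
--     rearranged = iban[4:] + iban[:4]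
--     rearranged = rearranged.upper()
--
--     # 3. Remplacer chaque lettre par sa valeur numérique A=10, B=11, ...
--     converted = ""
--     for char in rearranged:
--         if char.isdigit():
--             converted += char
--         elif char.isalpha():
--             # A -> 10, ..., Z -> 35
--             converted += str(ord(char) - 55)
--         else:
--             return False  # caractère invalide
--
--     # 4. Calcul mod 97 sur un nombre potentiellement très grand
--     # On calcule le modulo progressivement (méthode standard IBAN)
--     remainder = 0
--     for digit in converted:
--         remainder = (remainder * 10 + int(digit)) % 97
--
--     # 5. Un IBAN est valide si le résultat = 1
--     return remainder == 1
-- ===== SOURCE B (Python) =====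
-- def _mod97(remainder, chars):
--     """Fold one block of IBAN characters into the running mod-97 remainder.
--
--     Letters (upper-cased on the fly) contribute their two-digit value A=10..Z=35
--     in a single step (x100); digits contribute one step (x10). Returns None on an
--     invalid character.
--     """
--     for ch in chars:
--         if 'a' <= ch <= 'z':
--             ch = chr(ord(ch) - 32)
--         if '0' <= ch <= '9':
--             remainder = (remainder * 10 + ord(ch) - 48) % 97
--         elif 'A' <= ch <= 'Z':
--             remainder = (remainder * 100 + ord(ch) - 55) % 97
--         else:
--             return None
--     return remainder
--
--
-- def check_consistency_iban(iban: str) -> bool: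
--     if not iban:
--         return True
--     if len(iban) != 27:
--         return False
--     remainder = _mod97(0, iban[4:])
--     if remainder is None:
--         return False
--     remainder = _mod97(remainder, iban[:4])
--     if remainder is None:
--         return False
--     return remainder == 1
-- ===== Notes on version B (the rewrite author's own statement) =====
-- stated objective: simpler
-- what changed: B drops A's intermediate rearranged and converted strings and fuses the letter-to-number conversion and the progressive mod-97 reduction into one single-pass fold over the two IBAN blocks (check digits last), uppercasing each character on the fly and absorbing a letter in one x100 step.
import Mathlib
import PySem

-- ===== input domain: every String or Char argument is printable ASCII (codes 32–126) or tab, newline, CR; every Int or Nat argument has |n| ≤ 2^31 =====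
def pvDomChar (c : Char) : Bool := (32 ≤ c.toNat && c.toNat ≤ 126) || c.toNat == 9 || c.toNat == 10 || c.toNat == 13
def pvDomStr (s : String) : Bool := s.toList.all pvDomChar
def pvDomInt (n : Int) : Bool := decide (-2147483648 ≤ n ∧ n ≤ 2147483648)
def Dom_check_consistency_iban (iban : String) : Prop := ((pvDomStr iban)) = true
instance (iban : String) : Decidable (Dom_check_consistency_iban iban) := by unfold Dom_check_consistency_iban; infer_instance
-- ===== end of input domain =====

-- B (check_consistency_iban_alt) fuses A's convert-then-mod passes into one single-pass
-- mod-97 fold over the two IBAN blocks, with no intermediate rearranged/converted strings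
-- (objective: simpler).

-- ===== PORT A =====
-- conversion loop of A: appends the digit, or str(ord(char) - 55) for a letter; None = early `return False`
def pvAConvert : List Char → List Char → Option (List Char)
  | acc, [] => some acc
  | acc, c :: rest =>
    if PySem.Chars.isdigit c then pvAConvert (acc ++ [c]) rest
    else if PySem.Chars.isalpha c then
      pvAConvert (acc ++ PySem.Int.toChars ((c.toNat : Int) - 55)) rest
    else none

-- remainder loop of A; `int(digit)` ported as ofChars? with default 0 — exact, since
-- `converted` contains only ASCII digits, so ofChars? never returns none there
def pvARem (r : Int) (cs : List Char) : Int :=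
  cs.foldl (fun rem d => PySem.Int.mod (rem * 10 + (PySem.Int.ofChars? [d]).getD 0) 97) r

def check_consistency_iban (iban : String) : Bool :=
  let s := iban.toList
  if s.isEmpty then true
  else if s.length ≠ 27 then false
  else
    match pvAConvert [] (PySem.Chars.upper
        (PySem.Chars.slice s (some 4) none ++ PySem.Chars.slice s none (some 4))) with
    | none => false
    | some converted => decide (pvARem 0 converted = 1)

-- ===== PORT B =====
-- B's helper _mod97: one pass, per-char uppercase, running remainder; none = invalid char
def pvMod97 : Int → List Char → Option Int
  | r, [] => some r
  | r, c :: rest =>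
    let ch := if 'a' ≤ c ∧ c ≤ 'z' then Char.ofNat (c.toNat - 32) else c
    if '0' ≤ ch ∧ ch ≤ '9' then pvMod97 (PySem.Int.mod (r * 10 + (ch.toNat : Int) - 48) 97) rest
    else if 'A' ≤ ch ∧ ch ≤ 'Z' then pvMod97 (PySem.Int.mod (r * 100 + (ch.toNat : Int) - 55) 97) rest
    else none

def check_consistency_iban_alt (iban : String) : Bool :=
  let s := iban.toList
  if s.isEmpty then true
  else if s.length ≠ 27 then false
  else
    match pvMod97 0 (PySem.Chars.slice s (some 4) none) with
    | none => false
    | some r =>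
      match pvMod97 r (PySem.Chars.slice s none (some 4)) with
      | none => false
      | some r2 => decide (r2 = 1)

-- ===== PRECONDITION & SPEC =====
def Spec_check_consistency_iban (iban : String) (out : Bool) : Prop := out = check_consistency_iban_alt iban
instance (iban : String) (out : Bool) : Decidable (Spec_check_consistency_iban iban out) := by unfold Spec_check_consistency_iban; infer_instance

-- ===== CLAIM (what is proved, stated in full; the proofs are below) =====
def Claim_equal_check_consistency_iban : Prop := ∀ (iban : String), Dom_check_consistency_iban iban → Spec_check_consistency_iban iban (check_consistency_iban iban)

-- ===== LEMMAS AND PROOFS =====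

theorem pv_char_le_iff (a b : Char) : a ≤ b ↔ a.toNat ≤ b.toNat := by
  simp [Char.le_def, UInt32.le_iff_toNat_le]

theorem pv_toNat_ofNat (n : Nat) (h1 : 48 ≤ n) (h2 : n ≤ 122) : (Char.ofNat n).toNat = n := by
  have hv : n.isValidChar := Or.inl (by omega)
  rw [Char.toNat_ofNat]; simp [hv]

theorem pvIntOfDigit_eq (u : Char) (h1 : 48 ≤ u.toNat) (h2 : u.toNat ≤ 57) :
    (PySem.Int.ofChars? [u]).getD 0 = (u.toNat : Int) - 48 := by
  have hall : ∀ n < 58, 48 ≤ n → ((PySem.Int.ofChars? [Char.ofNat n]).getD 0) = (n : Int) - 48 := by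
    decide
  have := hall u.toNat (by omega) h1
  rwa [Char.ofNat_toNat] at this

theorem pvToChars_letter (u : Char) (h1 : 65 ≤ u.toNat) (h2 : u.toNat ≤ 90) :
    PySem.Int.toChars ((u.toNat : Int) - 55) =
      [Char.ofNat (48 + (u.toNat - 55) / 10), Char.ofNat (48 + (u.toNat - 55) % 10)] := by
  have hall : ∀ v < 36, 10 ≤ v →
      PySem.Int.toChars ((v : Nat) : Int) = [Char.ofNat (48 + v / 10), Char.ofNat (48 + v % 10)] := by
    decide
  have hcast : ((u.toNat : Int) - 55) = ((u.toNat - 55 : Nat) : Int) := by omega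
  rw [hcast]; exact hall _ (by omega) (by omega)

theorem pvAConvert_acc (l : List Char) : ∀ acc,
    pvAConvert acc l = (pvAConvert [] l).map (acc ++ ·) := by
  induction l with
  | nil => intro acc; simp [pvAConvert]
  | cons c rest ih =>
    intro acc
    simp only [pvAConvert]
    split_ifs with h1 h2
    · simp only [List.nil_append]
      rw [ih, ih [c]]; cases pvAConvert [] rest <;> simp
    · simp only [List.nil_append]
      rw [ih, ih (PySem.Int.toChars ((c.toNat : Int) - 55))]
      cases pvAConvert [] rest <;> simp
    · rfl

theorem pvMod97_append (xs ys : List Char) : ∀ r,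
    pvMod97 r (xs ++ ys) = (pvMod97 r xs).bind (fun r' => pvMod97 r' ys) := by
  induction xs with
  | nil => intro r; simp [pvMod97]
  | cons c rest ih =>
    intro r
    simp only [List.cons_append, pvMod97]
    split_ifs with h1 h2 <;> first | apply ih | rfl

theorem pvUpperChar_not_lower (c : Char) :
    ¬ ('a' ≤ PySem.Chars.upperChar c ∧ PySem.Chars.upperChar c ≤ 'z') := by
  unfold PySem.Chars.upperChar PySem.Chars.islower
  have ha : ('a' : Char).toNat = 97 := by decide
  have hz : ('z' : Char).toNat = 122 := by decide
  split_ifs with h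
  · simp only [Bool.and_eq_true, decide_eq_true_eq] at h
    rw [pv_char_le_iff, pv_char_le_iff] at h
    have hn : (Char.ofNat (c.toNat - 32)).toNat = c.toNat - 32 :=
      pv_toNat_ofNat _ (by omega) (by omega)
    intro hcon
    rw [pv_char_le_iff, pv_char_le_iff, hn, ha, hz] at hcon
    omega
  · intro hcon
    exact h (by simp [hcon.1, hcon.2])

-- B's per-char uppercase equals A's upperChar
theorem pvCh_eq_upperChar (c : Char) :
    (if 'a' ≤ c ∧ c ≤ 'z' then Char.ofNat (c.toNat - 32) else c) = PySem.Chars.upperChar c := by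
  simp [PySem.Chars.upperChar, PySem.Chars.islower]

-- central lemma: A's convert-then-mod over the uppercased list equals B's single fused pass
theorem pvKey (cs : List Char) : ∀ r : Int,
    Option.map (pvARem r) (pvAConvert [] (PySem.Chars.upper cs)) = pvMod97 r cs := by
  induction cs with
  | nil => intro r; simp [PySem.Chars.upper, pvAConvert, pvARem, pvMod97]
  | cons c rest ih =>
    intro r
    have hu : PySem.Chars.upper (c :: rest) = PySem.Chars.upperChar c :: PySem.Chars.upper rest := rfl
    rw [hu]
    simp only [pvMod97, pvCh_eq_upperChar]
    set u := PySem.Chars.upperChar c with hudef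
    have h0 : ('0' : Char).toNat = 48 := by decide
    have h9 : ('9' : Char).toNat = 57 := by decide
    have hA : ('A' : Char).toNat = 65 := by decide
    have hZ : ('Z' : Char).toNat = 90 := by decide
    by_cases hdig : '0' ≤ u ∧ u ≤ '9'
    · have hdig' : 48 ≤ u.toNat ∧ u.toNat ≤ 57 := by
        obtain ⟨x, y⟩ := hdig
        rw [pv_char_le_iff, h0] at x; rw [pv_char_le_iff, h9] at y; exact ⟨x, y⟩
      have hisd : PySem.Chars.isdigit u = true := by
        simp only [PySem.Chars.isdigit, Bool.and_eq_true, decide_eq_true_eq]; exact hdig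
      simp only [pvAConvert, hisd, if_true, if_pos hdig, List.nil_append]
      rw [pvAConvert_acc]
      rw [← ih (PySem.Int.mod (r * 10 + (u.toNat : Int) - 48) 97)]
      cases hx : pvAConvert [] (PySem.Chars.upper rest) with
      | none => simp
      | some conv =>
        simp only [Option.map_some, Option.some_inj]
        show pvARem r ([u] ++ conv) = _
        unfold pvARem
        rw [List.foldl_append]
        congr 1
        simp only [List.foldl_cons, List.foldl_nil]
        rw [pvIntOfDigit_eq u hdig'.1 hdig'.2]
        congr 1
        ring
    · by_cases hup : 'A' ≤ u ∧ u ≤ 'Z'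
      · have hup' : 65 ≤ u.toNat ∧ u.toNat ≤ 90 := by
          obtain ⟨x, y⟩ := hup
          rw [pv_char_le_iff, hA] at x; rw [pv_char_le_iff, hZ] at y; exact ⟨x, y⟩
        have hisd : PySem.Chars.isdigit u = false := by
          simp only [PySem.Chars.isdigit, Bool.and_eq_false_iff]
          right; simp only [decide_eq_false_iff_not]
          rw [pv_char_le_iff, h9]; omega
        have hisa : PySem.Chars.isalpha u = true := by
          simp only [PySem.Chars.isalpha, PySem.Chars.isupper, Bool.or_eq_true,
            Bool.and_eq_true, decide_eq_true_eq]
          exact Or.inl hup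
        simp only [pvAConvert, hisd, hisa, Bool.false_eq_true, if_false, if_true,
          if_neg hdig, if_pos hup, List.nil_append]
        rw [pvAConvert_acc]
        rw [← ih (PySem.Int.mod (r * 100 + (u.toNat : Int) - 55) 97)]
        cases hx : pvAConvert [] (PySem.Chars.upper rest) with
        | none => simp
        | some conv =>
          simp only [Option.map_some, Option.some_inj]
          show pvARem r (PySem.Int.toChars ((u.toNat : Int) - 55) ++ conv) = _
          unfold pvARem
          rw [List.foldl_append, pvToChars_letter u hup'.1 hup'.2]
          congr 1
          simp only [List.foldl_cons, List.foldl_nil]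
          have hd1 : (Char.ofNat (48 + (u.toNat - 55) / 10)).toNat = 48 + (u.toNat - 55) / 10 :=
            pv_toNat_ofNat _ (by omega) (by omega)
          have hd2 : (Char.ofNat (48 + (u.toNat - 55) % 10)).toNat = 48 + (u.toNat - 55) % 10 :=
            pv_toNat_ofNat _ (by omega) (by omega)
          rw [pvIntOfDigit_eq _ (by omega) (by omega), pvIntOfDigit_eq _ (by omega) (by omega),
            hd1, hd2]
          have hm : (0 : Int) < 97 := by norm_num
          simp only [PySem.Int.mod_eq_emod_of_pos hm]
          push_cast
          omega
      · have hisd : PySem.Chars.isdigit u = false := by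
          simp only [PySem.Chars.isdigit, Bool.and_eq_false_iff]
          by_cases hx : '0' ≤ u
          · right; simp only [decide_eq_false_iff_not]; exact fun hy => hdig ⟨hx, hy⟩
          · left; simp only [decide_eq_false_iff_not]; exact hx
        have hisa : PySem.Chars.isalpha u = false := by
          simp only [PySem.Chars.isalpha, PySem.Chars.isupper, Bool.or_eq_false_iff]
          constructor
          · simp only [Bool.and_eq_false_iff]
            by_cases hx : 'A' ≤ u
            · right; simp only [decide_eq_false_iff_not]; exact fun hy => hup ⟨hx, hy⟩
            · left; simp only [decide_eq_false_iff_not]; exact hx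
          · simp only [PySem.Chars.islower, Bool.and_eq_false_iff]
            have := pvUpperChar_not_lower c
            rw [← hudef] at this
            by_cases hx : 'a' ≤ u
            · right; simp only [decide_eq_false_iff_not]; exact fun hy => this ⟨hx, hy⟩
            · left; simp only [decide_eq_false_iff_not]; exact hx
        simp only [pvAConvert, hisd, hisa, Bool.false_eq_true, if_false,
          if_neg hdig, if_neg hup]
        rfl

-- ===== VERDICT (by name: the statement is the Claim_ definition above) =====
theorem check_consistency_iban_spec : Claim_equal_check_consistency_iban := by
  intro iban _
  unfold Spec_check_consistency_iban check_consistency_iban check_consistency_iban_alt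
  set s := iban.toList with hs
  by_cases h0 : s.isEmpty
  · simp [h0]
  · by_cases h27 : s.length ≠ 27
    · simp [h0, h27]
    · simp only [if_neg h0, if_neg h27]
      have hkey := pvKey (PySem.Chars.slice s (some 4) none ++ PySem.Chars.slice s none (some 4)) 0
      rw [pvMod97_append] at hkey
      cases hx : pvMod97 0 (PySem.Chars.slice s (some 4) none) with
      | none =>
        rw [hx] at hkey
        simp only [Option.bind_none, Option.map_eq_none_iff] at hkey
        rw [hkey]
      | some r =>
        rw [hx] at hkey
        simp only [Option.bind_some] at hkey
        cases hy : pvMod97 r (PySem.Chars.slice s none (some 4)) with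
        | none =>
          rw [hy] at hkey
          simp only [Option.map_eq_none_iff] at hkey
          rw [hkey]; simp only [hy]
        | some r2 =>
          rw [hy] at hkey
          cases hz : pvAConvert [] (PySem.Chars.upper
              (PySem.Chars.slice s (some 4) none ++ PySem.Chars.slice s none (some 4))) with
          | none => rw [hz] at hkey; simp at hkey
          | some conv =>
            rw [hz] at hkey
            simp only [Option.map_some, Option.some_inj] at hkey
            simp only [hy, hkey]
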